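-- pv_equiv track=rewrite | github.com/callmebaek/egurado | backend/app/services/naver_activation_service_v2.py | _get_overall_trend
-- ===== SOURCE A (Python) =====
-- from typing import Dict, Any, List, Optional
--
-- def _get_overall_trend(comparisons: Dict[str, Any]) -> str:
--     """전반적인 추세 판단"""
--     if not comparisons:
--         return 'stable'
--
--     up_count = sum(1 for comp in comparisons.values() if comp.get('direction') == 'up')
--     down_count = sum(1 for comp in comparisons.values() if comp.get('direction') == 'down')
--
--     if up_count > down_count:
--         return 'up'
--     elif down_count > up_count:
--         return 'down'
--     else:
--         return 'stable'
-- ===== SOURCE B (Python) =====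
-- def _get_overall_trend(comparisons):
--     """전반적인 추세 판단 — single-pass signed score instead of two count passes."""
--     score = 0
--     for comp in comparisons.values():
--         d = comp.get('direction')
--         if d == 'up':
--             score += 1
--         elif d == 'down':
--             score -= 1
--     if score > 0:
--         return 'up'
--     if score < 0:
--         return 'down'
--     return 'stable'
-- ===== Notes on version B (the rewrite author's own statement) =====
-- stated objective: simpler
-- what changed: Replaces the early-return plus two separate sum-comprehension passes (up_count, down_count) with one loop maintaining a single signed net score, whose sign decides the result.
import Mathlib
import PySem

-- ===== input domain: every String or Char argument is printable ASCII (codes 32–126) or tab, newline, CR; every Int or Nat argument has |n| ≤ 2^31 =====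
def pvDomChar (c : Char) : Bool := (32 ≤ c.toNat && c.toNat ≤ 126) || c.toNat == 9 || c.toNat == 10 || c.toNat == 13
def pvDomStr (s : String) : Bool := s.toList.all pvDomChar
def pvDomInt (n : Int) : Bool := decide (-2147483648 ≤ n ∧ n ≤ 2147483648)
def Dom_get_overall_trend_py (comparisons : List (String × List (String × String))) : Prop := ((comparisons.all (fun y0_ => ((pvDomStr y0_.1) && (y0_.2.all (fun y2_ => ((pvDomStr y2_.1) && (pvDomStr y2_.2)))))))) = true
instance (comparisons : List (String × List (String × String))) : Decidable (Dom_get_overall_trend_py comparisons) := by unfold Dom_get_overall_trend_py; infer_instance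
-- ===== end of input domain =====

-- B changes A's decomposition: one signed net score in a single pass instead of two sum passes.

-- comp.get('direction'): first-match association-list lookup (exact for a Python dict's .get)
def pvDirGet : List (String × String) → Option String
  | [] => none
  | (k, v) :: rest => if k = "direction" then some v else pvDirGet rest

-- ===== PORT A =====
def get_overall_trend_py (comparisons : List (String × List (String × String))) : String :=
  if comparisons = [] then "stable"
  else
    let up_count : Int := comparisons.foldl
      (fun acc p => if pvDirGet p.2 = some "up" then acc + 1 else acc) 0
    let down_count : Int := comparisons.foldl
      (fun acc p => if pvDirGet p.2 = some "down" then acc + 1 else acc) 0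
    if up_count > down_count then "up"
    else if down_count > up_count then "down"
    else "stable"

-- ===== PORT B =====
def get_overall_trend_py_alt (comparisons : List (String × List (String × String))) : String :=
  let score : Int := comparisons.foldl
    (fun s p =>
      let d := pvDirGet p.2
      if d = some "up" then s + 1 else if d = some "down" then s - 1 else s) 0
  if score > 0 then "up"
  else if score < 0 then "down"
  else "stable"

-- ===== PRECONDITION & SPEC =====
def Spec_get_overall_trend_py (comparisons : List (String × List (String × String))) (out : String) : Prop := out = get_overall_trend_py_alt comparisons
instance (comparisons : List (String × List (String × String))) (out : String) : Decidable (Spec_get_overall_trend_py comparisons out) := by unfold Spec_get_overall_trend_py; infer_instance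

-- ===== CLAIM =====
def Claim_equal_get_overall_trend_py : Prop := ∀ (comparisons : List (String × List (String × String))), Dom_get_overall_trend_py comparisons → Spec_get_overall_trend_py comparisons (get_overall_trend_py comparisons)

-- ===== LEMMAS AND PROOFS =====

theorem up_fold_shift (l : List (String × List (String × String))) (a : Int) :
    l.foldl (fun acc p => if pvDirGet p.2 = some "up" then acc + 1 else acc) a
      = a + l.foldl (fun acc p => if pvDirGet p.2 = some "up" then acc + 1 else acc) 0 := by
  induction l generalizing a with
  | nil => simp
  | cons h t ih =>
      simp only [List.foldl_cons]
      rw [ih, ih (if pvDirGet h.2 = some "up" then (0:Int) + 1 else 0)]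
      split_ifs <;> ring

theorem down_fold_shift (l : List (String × List (String × String))) (a : Int) :
    l.foldl (fun acc p => if pvDirGet p.2 = some "down" then acc + 1 else acc) a
      = a + l.foldl (fun acc p => if pvDirGet p.2 = some "down" then acc + 1 else acc) 0 := by
  induction l generalizing a with
  | nil => simp
  | cons h t ih =>
      simp only [List.foldl_cons]
      rw [ih, ih (if pvDirGet h.2 = some "down" then (0:Int) + 1 else 0)]
      split_ifs <;> ring

-- B's running score equals A's up-count minus down-count, for any start value.
theorem score_eq (l : List (String × List (String × String))) (s : Int) :
    l.foldl (fun s p =>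
        let d := pvDirGet p.2
        if d = some "up" then s + 1 else if d = some "down" then s - 1 else s) s
      = s + l.foldl (fun acc p => if pvDirGet p.2 = some "up" then acc + 1 else acc) 0
          - l.foldl (fun acc p => if pvDirGet p.2 = some "down" then acc + 1 else acc) 0 := by
  induction l generalizing s with
  | nil => simp
  | cons h t ih =>
      simp only [List.foldl_cons]
      rw [ih, up_fold_shift t (if pvDirGet h.2 = some "up" then (0:Int) + 1 else 0),
          down_fold_shift t (if pvDirGet h.2 = some "down" then (0:Int) + 1 else 0)]
      split_ifs with h1 h2 <;> simp_all <;> ring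

-- ===== VERDICT =====
theorem get_overall_trend_py_spec : Claim_equal_get_overall_trend_py := by
  intro comparisons _
  unfold Spec_get_overall_trend_py get_overall_trend_py get_overall_trend_py_alt
  rcases comparisons with _ | ⟨h, t⟩
  · simp
  · simp only [if_neg (List.cons_ne_nil h t)]
    rw [score_eq]
    set u := (h :: t).foldl (fun acc p => if pvDirGet p.2 = some "up" then acc + 1 else acc) (0:Int) with hu
    set d := (h :: t).foldl (fun acc p => if pvDirGet p.2 = some "down" then acc + 1 else acc) (0:Int) with hd
    split_ifs <;> first | rfl | omega
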